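-- pv_equiv track=rewrite | github.com/juanlurg/tsql-to-postgresql | src/tsql_migrator/transforms/function_rewriter.py | _dotnet_to_tochar
-- ===== SOURCE A (Python) =====
-- def _dotnet_to_tochar(pattern: str) -> str:
--     """Best-effort conversion of .NET format strings to TO_CHAR patterns."""
--     replacements = [
--         ("yyyy", "YYYY"),
--         ("yy", "YY"),
--         ("MM", "MM"),
--         ("dd", "DD"),
--         ("HH", "HH24"),
--         ("hh", "HH12"),
--         ("mm", "MI"),
--         ("ss", "SS"),
--         ("fff", "MS"),
--         ("tt", "AM"),
--     ]
--     result = pattern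
--     for dotnet, pg in replacements:
--         result = result.replace(dotnet, pg)
--     return result
-- ===== SOURCE B (Python) =====
-- _TABLE = [
--     ("yyyy", "YYYY"),
--     ("yy", "YY"),
--     ("MM", "MM"),
--     ("dd", "DD"),
--     ("HH", "HH24"),
--     ("hh", "HH12"),
--     ("mm", "MI"),
--     ("ss", "SS"),
--     ("fff", "MS"),
--     ("tt", "AM"),
-- ]
--
--
-- def _dotnet_to_tochar(pattern: str) -> str:
--     """Single left-to-right pass: at each position emit the translation of the
--     first matching .NET token (in priority order) or the literal character."""
--     out = []
--     i = 0
--     n = len(pattern)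
--     while i < n:
--         for dotnet, pg in _TABLE:
--             if pattern.startswith(dotnet, i):
--                 out.append(pg)
--                 i += len(dotnet)
--                 break
--         else:
--             out.append(pattern[i])
--             i += 1
--     return "".join(out)
-- ===== Notes on version B (the rewrite author's own statement) =====
-- stated objective: alternative
-- what changed: A rewrites the string in ten sequential full .replace passes (one per .NET token); B makes a single left-to-right scan, emitting at each position the translation of the first matching token in priority order or the literal character.
import Mathlib
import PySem

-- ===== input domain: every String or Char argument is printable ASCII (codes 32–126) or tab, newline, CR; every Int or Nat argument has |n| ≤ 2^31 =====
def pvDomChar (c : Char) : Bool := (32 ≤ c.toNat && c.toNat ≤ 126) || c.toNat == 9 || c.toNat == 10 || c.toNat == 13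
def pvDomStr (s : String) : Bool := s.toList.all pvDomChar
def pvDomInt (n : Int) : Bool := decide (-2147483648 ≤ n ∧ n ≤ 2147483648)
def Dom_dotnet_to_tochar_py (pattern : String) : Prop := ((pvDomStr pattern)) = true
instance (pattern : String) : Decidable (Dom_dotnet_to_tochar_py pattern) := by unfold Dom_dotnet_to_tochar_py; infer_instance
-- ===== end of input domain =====

-- B re-implements A's ten sequential .replace passes as one left-to-right scan over the
-- string (first matching token in priority order is emitted, else the literal character);
-- objective: alternative single-pass algorithm, proved to return the same string.

-- ===== PORT A =====
-- Literal port of A: fold the replacement table over the string, one full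
-- PySem.Str.replace pass per table entry (ten passes, like the Python loop).
def dotnet_to_tochar_py (pattern : String) : String :=
  let replacements : List (String × String) :=
    [("yyyy", "YYYY"), ("yy", "YY"), ("MM", "MM"), ("dd", "DD"), ("HH", "HH24"),
     ("hh", "HH12"), ("mm", "MI"), ("ss", "SS"), ("fff", "MS"), ("tt", "AM")]
  replacements.foldl (fun result p => PySem.Str.replace result p.1 p.2) pattern

-- ===== PORT B =====
-- B-side helper: the while-loop of Source B on the character list; the inner
-- `for dotnet, pg in _TABLE … break` is transcribed as the if-chain below
-- (one branch per table row, in table order), `else` appends the literal char.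
def pvAltGo : List Char → List Char
  | [] => []
  | c :: t =>
    if List.isPrefixOf ['y','y','y','y'] (c :: t) then ['Y','Y','Y','Y'] ++ pvAltGo (t.drop 3)
    else if List.isPrefixOf ['y','y'] (c :: t) then ['Y','Y'] ++ pvAltGo (t.drop 1)
    else if List.isPrefixOf ['M','M'] (c :: t) then ['M','M'] ++ pvAltGo (t.drop 1)
    else if List.isPrefixOf ['d','d'] (c :: t) then ['D','D'] ++ pvAltGo (t.drop 1)
    else if List.isPrefixOf ['H','H'] (c :: t) then ['H','H','2','4'] ++ pvAltGo (t.drop 1)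
    else if List.isPrefixOf ['h','h'] (c :: t) then ['H','H','1','2'] ++ pvAltGo (t.drop 1)
    else if List.isPrefixOf ['m','m'] (c :: t) then ['M','I'] ++ pvAltGo (t.drop 1)
    else if List.isPrefixOf ['s','s'] (c :: t) then ['S','S'] ++ pvAltGo (t.drop 1)
    else if List.isPrefixOf ['f','f','f'] (c :: t) then ['M','S'] ++ pvAltGo (t.drop 2)
    else if List.isPrefixOf ['t','t'] (c :: t) then ['A','M'] ++ pvAltGo (t.drop 1)
    else c :: pvAltGo t
  termination_by l => l.length
  decreasing_by all_goals (simp [List.length_drop]; try omega)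

def dotnet_to_tochar_py_alt (pattern : String) : String :=
  String.ofList (pvAltGo pattern.toList)

-- ===== PRECONDITION & SPEC =====
def Spec_dotnet_to_tochar_py (pattern : String) (out : String) : Prop := out = dotnet_to_tochar_py_alt pattern
instance (pattern : String) (out : String) : Decidable (Spec_dotnet_to_tochar_py pattern out) := by unfold Spec_dotnet_to_tochar_py; infer_instance

-- ===== CLAIM (what is proved, stated in full; the proofs are below) =====
def Claim_equal_dotnet_to_tochar_py : Prop := ∀ (pattern : String), Dom_dotnet_to_tochar_py pattern → Spec_dotnet_to_tochar_py pattern (dotnet_to_tochar_py pattern)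

-- ===== LEMMAS AND PROOFS =====

-- One leftmost non-overlapping replacement pass (old ≠ []), as a plain structural
-- recursion; pvReplace_eq identifies it with PySem.Chars.replace.
def pvRep (old new : List Char) : List Char → List Char
  | [] => []
  | c :: t =>
    if List.isPrefixOf old (c :: t) then new ++ pvRep old new (t.drop (old.length - 1))
    else c :: pvRep old new t
  termination_by l => l.length
  decreasing_by all_goals (simp [List.length_drop]; try omega)

lemma pvGo_eq (old new : List Char) (hold : old ≠ []) :
    ∀ (fuel : Nat) (l acc : List Char), l.length ≤ fuel →
      PySem.Chars.replace.go old new fuel l acc = acc.reverse ++ pvRep old new l := by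
  intro fuel
  induction fuel with
  | zero =>
    intro l acc h
    have hl : l = [] := List.eq_nil_of_length_eq_zero (Nat.le_zero.mp h)
    subst hl
    rw [PySem.Chars.replace.go.eq_def]
    simp [pvRep]
  | succ m ihm =>
    intro l acc h
    cases l with
    | nil => rw [PySem.Chars.replace.go.eq_def]; simp [pvRep]
    | cons c t =>
      obtain ⟨a, as, rfl⟩ : ∃ a as, old = a :: as := by
        cases old with
        | nil => exact absurd rfl hold
        | cons a as => exact ⟨a, as, rfl⟩
      have hgo : PySem.Chars.replace.go (a :: as) new (m + 1) (c :: t) acc =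
          (if (a :: as).isPrefixOf (c :: t) = true then
            PySem.Chars.replace.go (a :: as) new m (List.drop (a :: as).length (c :: t))
              (new.reverse ++ acc)
          else PySem.Chars.replace.go (a :: as) new m t (c :: acc)) := by
        rw [PySem.Chars.replace.go.eq_def]
      rw [hgo]
      by_cases hp : List.isPrefixOf (a :: as) (c :: t) = true
      · rw [if_pos hp]
        rw [ihm (List.drop (a :: as).length (c :: t)) (new.reverse ++ acc)
              (by simp only [List.length_drop, List.length_cons] at h ⊢; omega)]
        simp only [pvRep, if_pos hp, List.length_cons, List.drop_succ_cons,
          Nat.add_sub_cancel, List.reverse_append, List.reverse_reverse, List.append_assoc]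
      · rw [if_neg hp]
        rw [ihm t (c :: acc) (by simp only [List.length_cons] at h; omega)]
        simp only [pvRep, if_neg hp, List.reverse_cons, List.append_assoc,
          List.cons_append, List.nil_append]

lemma pvReplace_eq (s old new : List Char) (hold : old ≠ []) :
    PySem.Chars.replace s old new = pvRep old new s := by
  unfold PySem.Chars.replace
  rw [if_neg (by simpa [List.isEmpty_iff] using hold)]
  simpa using pvGo_eq old new hold s.length s [] le_rfl

lemma pvRep_neg (old new : List Char) (c : Char) (t : List Char) (h : ¬ old <+: (c :: t)) :
    pvRep old new (c :: t) = c :: pvRep old new t := by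
  simp only [pvRep]
  rw [if_neg]
  simpa [List.isPrefixOf_iff_prefix] using h

lemma pvSkip1 (a : Char) (as new : List Char) (c : Char) {Z : List Char} (h : a ≠ c) :
    pvRep (a :: as) new (c :: Z) = c :: pvRep (a :: as) new Z := by
  apply pvRep_neg
  intro hp
  exact h (List.cons_prefix_cons.mp hp).1

lemma pvPos2 (a b : Char) (new : List Char) {Z : List Char} :
    pvRep [a, b] new (a :: b :: Z) = new ++ pvRep [a, b] new Z := by
  simp only [pvRep]
  rw [if_pos (by simp)]
  simp

lemma pvPos3 (a b d : Char) (new : List Char) {Z : List Char} :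
    pvRep [a, b, d] new (a :: b :: d :: Z) = new ++ pvRep [a, b, d] new Z := by
  simp only [pvRep]
  rw [if_pos (by simp)]
  simp

lemma pvPos4 (a b d e : Char) (new : List Char) {Z : List Char} :
    pvRep [a, b, d, e] new (a :: b :: d :: e :: Z) = new ++ pvRep [a, b, d, e] new Z := by
  simp only [pvRep]
  rw [if_pos (by simp)]
  simp

-- a prefix made of characters foreign to `new` survives a replacement pass backwards
lemma pvRep_transfer (old new : List Char) (_hold : old ≠ []) (hnew : new ≠ []) :
    ∀ {p Y : List Char}, (∀ c ∈ p, c ∉ new) → p <+: pvRep old new Y → p <+: Y := by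
  suffices h : ∀ (n : Nat) (Y : List Char), Y.length ≤ n →
      ∀ p : List Char, (∀ c ∈ p, c ∉ new) → p <+: pvRep old new Y → p <+: Y by
    intro p Y hd hp
    exact h Y.length Y le_rfl p hd hp
  intro n
  induction n with
  | zero =>
    intro Y hY p hd hp
    have : Y = [] := List.eq_nil_of_length_eq_zero (Nat.le_zero.mp hY)
    subst this
    simpa [pvRep] using hp
  | succ m ihm =>
    intro Y hY p hd hp
    cases Y with
    | nil => simpa [pvRep] using hp
    | cons c t =>
      by_cases hpre : List.isPrefixOf old (c :: t) = true
      · simp only [pvRep, if_pos hpre] at hp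
        cases p with
        | nil => exact List.nil_prefix
        | cons q qs =>
          exfalso
          obtain ⟨b, bs, rfl⟩ : ∃ b bs, new = b :: bs := by
            cases new with
            | nil => exact absurd rfl hnew
            | cons b bs => exact ⟨b, bs, rfl⟩
          simp only [List.cons_append] at hp
          have hq : q = b := ((List.cons_prefix_cons.mp hp).1)
          exact hd q (by simp) (by simp [hq])
      · simp only [pvRep, if_neg hpre] at hp
        cases p with
        | nil => exact List.nil_prefix
        | cons q qs =>
          obtain ⟨rfl, hqs⟩ := List.cons_prefix_cons.mp hp
          refine List.cons_prefix_cons.mpr ⟨rfl, ?_⟩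
          exact ihm t (by simp only [List.length_cons] at hY; omega) qs
            (fun x hx => hd x (by simp [hx])) hqs

-- A's whole pipeline on a character list: the ten passes, innermost first
def pvChain (l : List Char) : List Char :=
  pvRep ['t','t'] ['A','M'] (pvRep ['f','f','f'] ['M','S'] (pvRep ['s','s'] ['S','S'] (pvRep ['m','m'] ['M','I'] (pvRep ['h','h'] ['H','H','1','2'] (pvRep ['H','H'] ['H','H','2','4'] (pvRep ['d','d'] ['D','D'] (pvRep ['M','M'] ['M','M'] (pvRep ['y','y'] ['Y','Y'] (pvRep ['y','y','y','y'] ['Y','Y','Y','Y'] (l))))))))))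

lemma pvMain : ∀ (n : Nat) (l : List Char), l.length ≤ n → pvChain l = pvAltGo l := by
  intro n
  induction n with
  | zero =>
    intro l h
    have : l = [] := List.eq_nil_of_length_eq_zero (Nat.le_zero.mp h)
    subst this
    simp [pvChain, pvRep, pvAltGo]
  | succ n ih =>
    intro l hlen
    cases l with
    | nil => simp [pvChain, pvRep, pvAltGo]
    | cons c t =>
      by_cases h1 : (['y','y','y','y'] : List Char) <+: c :: t
      · obtain ⟨rest, hres⟩ := h1
        simp only [List.cons_append, List.nil_append] at hres
        obtain ⟨rfl, rfl⟩ := List.cons.injEq .. |>.mp hres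
        have hb : rest.length ≤ n := by simp only [List.length_cons] at hlen; omega
        have hrest := ih rest hb
        simp only [pvChain] at hrest
        simp only [pvChain]
        rw [pvPos4 'y' 'y' 'y' 'y' ['Y','Y','Y','Y']]
        simp only [List.cons_append, List.nil_append]
        rw [pvSkip1 'y' ['y'] ['Y','Y'] 'Y' (by decide)]
        rw [pvSkip1 'y' ['y'] ['Y','Y'] 'Y' (by decide)]
        rw [pvSkip1 'y' ['y'] ['Y','Y'] 'Y' (by decide)]
        rw [pvSkip1 'y' ['y'] ['Y','Y'] 'Y' (by decide)]
        rw [pvSkip1 'M' ['M'] ['M','M'] 'Y' (by decide)]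
        rw [pvSkip1 'M' ['M'] ['M','M'] 'Y' (by decide)]
        rw [pvSkip1 'M' ['M'] ['M','M'] 'Y' (by decide)]
        rw [pvSkip1 'M' ['M'] ['M','M'] 'Y' (by decide)]
        rw [pvSkip1 'd' ['d'] ['D','D'] 'Y' (by decide)]
        rw [pvSkip1 'd' ['d'] ['D','D'] 'Y' (by decide)]
        rw [pvSkip1 'd' ['d'] ['D','D'] 'Y' (by decide)]
        rw [pvSkip1 'd' ['d'] ['D','D'] 'Y' (by decide)]
        rw [pvSkip1 'H' ['H'] ['H','H','2','4'] 'Y' (by decide)]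
        rw [pvSkip1 'H' ['H'] ['H','H','2','4'] 'Y' (by decide)]
        rw [pvSkip1 'H' ['H'] ['H','H','2','4'] 'Y' (by decide)]
        rw [pvSkip1 'H' ['H'] ['H','H','2','4'] 'Y' (by decide)]
        rw [pvSkip1 'h' ['h'] ['H','H','1','2'] 'Y' (by decide)]
        rw [pvSkip1 'h' ['h'] ['H','H','1','2'] 'Y' (by decide)]
        rw [pvSkip1 'h' ['h'] ['H','H','1','2'] 'Y' (by decide)]
        rw [pvSkip1 'h' ['h'] ['H','H','1','2'] 'Y' (by decide)]
        rw [pvSkip1 'm' ['m'] ['M','I'] 'Y' (by decide)]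
        rw [pvSkip1 'm' ['m'] ['M','I'] 'Y' (by decide)]
        rw [pvSkip1 'm' ['m'] ['M','I'] 'Y' (by decide)]
        rw [pvSkip1 'm' ['m'] ['M','I'] 'Y' (by decide)]
        rw [pvSkip1 's' ['s'] ['S','S'] 'Y' (by decide)]
        rw [pvSkip1 's' ['s'] ['S','S'] 'Y' (by decide)]
        rw [pvSkip1 's' ['s'] ['S','S'] 'Y' (by decide)]
        rw [pvSkip1 's' ['s'] ['S','S'] 'Y' (by decide)]
        rw [pvSkip1 'f' ['f','f'] ['M','S'] 'Y' (by decide)]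
        rw [pvSkip1 'f' ['f','f'] ['M','S'] 'Y' (by decide)]
        rw [pvSkip1 'f' ['f','f'] ['M','S'] 'Y' (by decide)]
        rw [pvSkip1 'f' ['f','f'] ['M','S'] 'Y' (by decide)]
        rw [pvSkip1 't' ['t'] ['A','M'] 'Y' (by decide)]
        rw [pvSkip1 't' ['t'] ['A','M'] 'Y' (by decide)]
        rw [pvSkip1 't' ['t'] ['A','M'] 'Y' (by decide)]
        rw [pvSkip1 't' ['t'] ['A','M'] 'Y' (by decide)]
        rw [hrest]
        simp [pvAltGo]
      by_cases h2 : (['y','y'] : List Char) <+: c :: t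
      · obtain ⟨rest, hres⟩ := h2
        simp only [List.cons_append, List.nil_append] at hres
        obtain ⟨rfl, rfl⟩ := List.cons.injEq .. |>.mp hres
        have hb : rest.length ≤ n := by simp only [List.length_cons] at hlen; omega
        have hrest := ih rest hb
        simp only [pvChain] at hrest
        have h1n : ¬ (['y','y','y','y'] : List Char) <+: 'y' :: 'y' :: rest := h1
        have h1b : ¬ (['y','y','y','y'] : List Char) <+: 'y' :: rest := by
          intro hp
          apply h1n
          obtain ⟨-, hp2⟩ := List.cons_prefix_cons.mp hp
          exact List.cons_prefix_cons.mpr ⟨rfl, List.cons_prefix_cons.mpr ⟨rfl,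
            List.IsPrefix.trans (⟨['y'], rfl⟩ : (['y','y'] : List Char) <+: ['y','y','y']) hp2⟩⟩
        simp only [pvChain]
        rw [pvRep_neg _ _ _ _ h1n, pvRep_neg _ _ _ _ h1b]
        rw [pvPos2 'y' 'y' ['Y','Y']]
        simp only [List.cons_append, List.nil_append]
        rw [pvSkip1 'M' ['M'] ['M','M'] 'Y' (by decide)]
        rw [pvSkip1 'M' ['M'] ['M','M'] 'Y' (by decide)]
        rw [pvSkip1 'd' ['d'] ['D','D'] 'Y' (by decide)]
        rw [pvSkip1 'd' ['d'] ['D','D'] 'Y' (by decide)]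
        rw [pvSkip1 'H' ['H'] ['H','H','2','4'] 'Y' (by decide)]
        rw [pvSkip1 'H' ['H'] ['H','H','2','4'] 'Y' (by decide)]
        rw [pvSkip1 'h' ['h'] ['H','H','1','2'] 'Y' (by decide)]
        rw [pvSkip1 'h' ['h'] ['H','H','1','2'] 'Y' (by decide)]
        rw [pvSkip1 'm' ['m'] ['M','I'] 'Y' (by decide)]
        rw [pvSkip1 'm' ['m'] ['M','I'] 'Y' (by decide)]
        rw [pvSkip1 's' ['s'] ['S','S'] 'Y' (by decide)]
        rw [pvSkip1 's' ['s'] ['S','S'] 'Y' (by decide)]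
        rw [pvSkip1 'f' ['f','f'] ['M','S'] 'Y' (by decide)]
        rw [pvSkip1 'f' ['f','f'] ['M','S'] 'Y' (by decide)]
        rw [pvSkip1 't' ['t'] ['A','M'] 'Y' (by decide)]
        rw [pvSkip1 't' ['t'] ['A','M'] 'Y' (by decide)]
        rw [hrest]
        have h1n2 : ¬ (['y','y'] : List Char) <+: rest := by
          simpa [List.cons_prefix_cons] using h1n
        simp [pvAltGo, List.isPrefixOf_iff_prefix, h1n2]
      by_cases h3 : (['M','M'] : List Char) <+: c :: t
      · obtain ⟨rest, hres⟩ := h3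
        simp only [List.cons_append, List.nil_append] at hres
        obtain ⟨rfl, rfl⟩ := List.cons.injEq .. |>.mp hres
        have hb : rest.length ≤ n := by simp only [List.length_cons] at hlen; omega
        have hrest := ih rest hb
        simp only [pvChain] at hrest
        simp only [pvChain]
        rw [pvSkip1 'y' ['y','y','y'] ['Y','Y','Y','Y'] 'M' (by decide)]
        rw [pvSkip1 'y' ['y','y','y'] ['Y','Y','Y','Y'] 'M' (by decide)]
        rw [pvSkip1 'y' ['y'] ['Y','Y'] 'M' (by decide)]
        rw [pvSkip1 'y' ['y'] ['Y','Y'] 'M' (by decide)]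
        rw [pvPos2 'M' 'M' ['M','M']]
        simp only [List.cons_append, List.nil_append]
        rw [pvSkip1 'd' ['d'] ['D','D'] 'M' (by decide)]
        rw [pvSkip1 'd' ['d'] ['D','D'] 'M' (by decide)]
        rw [pvSkip1 'H' ['H'] ['H','H','2','4'] 'M' (by decide)]
        rw [pvSkip1 'H' ['H'] ['H','H','2','4'] 'M' (by decide)]
        rw [pvSkip1 'h' ['h'] ['H','H','1','2'] 'M' (by decide)]
        rw [pvSkip1 'h' ['h'] ['H','H','1','2'] 'M' (by decide)]
        rw [pvSkip1 'm' ['m'] ['M','I'] 'M' (by decide)]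
        rw [pvSkip1 'm' ['m'] ['M','I'] 'M' (by decide)]
        rw [pvSkip1 's' ['s'] ['S','S'] 'M' (by decide)]
        rw [pvSkip1 's' ['s'] ['S','S'] 'M' (by decide)]
        rw [pvSkip1 'f' ['f','f'] ['M','S'] 'M' (by decide)]
        rw [pvSkip1 'f' ['f','f'] ['M','S'] 'M' (by decide)]
        rw [pvSkip1 't' ['t'] ['A','M'] 'M' (by decide)]
        rw [pvSkip1 't' ['t'] ['A','M'] 'M' (by decide)]
        rw [hrest]
        simp [pvAltGo, List.isPrefixOf_iff_prefix, List.cons_prefix_cons]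
      by_cases h4 : (['d','d'] : List Char) <+: c :: t
      · obtain ⟨rest, hres⟩ := h4
        simp only [List.cons_append, List.nil_append] at hres
        obtain ⟨rfl, rfl⟩ := List.cons.injEq .. |>.mp hres
        have hb : rest.length ≤ n := by simp only [List.length_cons] at hlen; omega
        have hrest := ih rest hb
        simp only [pvChain] at hrest
        simp only [pvChain]
        rw [pvSkip1 'y' ['y','y','y'] ['Y','Y','Y','Y'] 'd' (by decide)]
        rw [pvSkip1 'y' ['y','y','y'] ['Y','Y','Y','Y'] 'd' (by decide)]
        rw [pvSkip1 'y' ['y'] ['Y','Y'] 'd' (by decide)]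
        rw [pvSkip1 'y' ['y'] ['Y','Y'] 'd' (by decide)]
        rw [pvSkip1 'M' ['M'] ['M','M'] 'd' (by decide)]
        rw [pvSkip1 'M' ['M'] ['M','M'] 'd' (by decide)]
        rw [pvPos2 'd' 'd' ['D','D']]
        simp only [List.cons_append, List.nil_append]
        rw [pvSkip1 'H' ['H'] ['H','H','2','4'] 'D' (by decide)]
        rw [pvSkip1 'H' ['H'] ['H','H','2','4'] 'D' (by decide)]
        rw [pvSkip1 'h' ['h'] ['H','H','1','2'] 'D' (by decide)]
        rw [pvSkip1 'h' ['h'] ['H','H','1','2'] 'D' (by decide)]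
        rw [pvSkip1 'm' ['m'] ['M','I'] 'D' (by decide)]
        rw [pvSkip1 'm' ['m'] ['M','I'] 'D' (by decide)]
        rw [pvSkip1 's' ['s'] ['S','S'] 'D' (by decide)]
        rw [pvSkip1 's' ['s'] ['S','S'] 'D' (by decide)]
        rw [pvSkip1 'f' ['f','f'] ['M','S'] 'D' (by decide)]
        rw [pvSkip1 'f' ['f','f'] ['M','S'] 'D' (by decide)]
        rw [pvSkip1 't' ['t'] ['A','M'] 'D' (by decide)]
        rw [pvSkip1 't' ['t'] ['A','M'] 'D' (by decide)]
        rw [hrest]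
        simp [pvAltGo, List.isPrefixOf_iff_prefix, List.cons_prefix_cons]
      by_cases h5 : (['H','H'] : List Char) <+: c :: t
      · obtain ⟨rest, hres⟩ := h5
        simp only [List.cons_append, List.nil_append] at hres
        obtain ⟨rfl, rfl⟩ := List.cons.injEq .. |>.mp hres
        have hb : rest.length ≤ n := by simp only [List.length_cons] at hlen; omega
        have hrest := ih rest hb
        simp only [pvChain] at hrest
        simp only [pvChain]
        rw [pvSkip1 'y' ['y','y','y'] ['Y','Y','Y','Y'] 'H' (by decide)]
        rw [pvSkip1 'y' ['y','y','y'] ['Y','Y','Y','Y'] 'H' (by decide)]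
        rw [pvSkip1 'y' ['y'] ['Y','Y'] 'H' (by decide)]
        rw [pvSkip1 'y' ['y'] ['Y','Y'] 'H' (by decide)]
        rw [pvSkip1 'M' ['M'] ['M','M'] 'H' (by decide)]
        rw [pvSkip1 'M' ['M'] ['M','M'] 'H' (by decide)]
        rw [pvSkip1 'd' ['d'] ['D','D'] 'H' (by decide)]
        rw [pvSkip1 'd' ['d'] ['D','D'] 'H' (by decide)]
        rw [pvPos2 'H' 'H' ['H','H','2','4']]
        simp only [List.cons_append, List.nil_append]
        rw [pvSkip1 'h' ['h'] ['H','H','1','2'] 'H' (by decide)]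
        rw [pvSkip1 'h' ['h'] ['H','H','1','2'] 'H' (by decide)]
        rw [pvSkip1 'h' ['h'] ['H','H','1','2'] '2' (by decide)]
        rw [pvSkip1 'h' ['h'] ['H','H','1','2'] '4' (by decide)]
        rw [pvSkip1 'm' ['m'] ['M','I'] 'H' (by decide)]
        rw [pvSkip1 'm' ['m'] ['M','I'] 'H' (by decide)]
        rw [pvSkip1 'm' ['m'] ['M','I'] '2' (by decide)]
        rw [pvSkip1 'm' ['m'] ['M','I'] '4' (by decide)]
        rw [pvSkip1 's' ['s'] ['S','S'] 'H' (by decide)]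
        rw [pvSkip1 's' ['s'] ['S','S'] 'H' (by decide)]
        rw [pvSkip1 's' ['s'] ['S','S'] '2' (by decide)]
        rw [pvSkip1 's' ['s'] ['S','S'] '4' (by decide)]
        rw [pvSkip1 'f' ['f','f'] ['M','S'] 'H' (by decide)]
        rw [pvSkip1 'f' ['f','f'] ['M','S'] 'H' (by decide)]
        rw [pvSkip1 'f' ['f','f'] ['M','S'] '2' (by decide)]
        rw [pvSkip1 'f' ['f','f'] ['M','S'] '4' (by decide)]
        rw [pvSkip1 't' ['t'] ['A','M'] 'H' (by decide)]
        rw [pvSkip1 't' ['t'] ['A','M'] 'H' (by decide)]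
        rw [pvSkip1 't' ['t'] ['A','M'] '2' (by decide)]
        rw [pvSkip1 't' ['t'] ['A','M'] '4' (by decide)]
        rw [hrest]
        simp [pvAltGo, List.isPrefixOf_iff_prefix, List.cons_prefix_cons]
      by_cases h6 : (['h','h'] : List Char) <+: c :: t
      · obtain ⟨rest, hres⟩ := h6
        simp only [List.cons_append, List.nil_append] at hres
        obtain ⟨rfl, rfl⟩ := List.cons.injEq .. |>.mp hres
        have hb : rest.length ≤ n := by simp only [List.length_cons] at hlen; omega
        have hrest := ih rest hb
        simp only [pvChain] at hrest
        simp only [pvChain]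
        rw [pvSkip1 'y' ['y','y','y'] ['Y','Y','Y','Y'] 'h' (by decide)]
        rw [pvSkip1 'y' ['y','y','y'] ['Y','Y','Y','Y'] 'h' (by decide)]
        rw [pvSkip1 'y' ['y'] ['Y','Y'] 'h' (by decide)]
        rw [pvSkip1 'y' ['y'] ['Y','Y'] 'h' (by decide)]
        rw [pvSkip1 'M' ['M'] ['M','M'] 'h' (by decide)]
        rw [pvSkip1 'M' ['M'] ['M','M'] 'h' (by decide)]
        rw [pvSkip1 'd' ['d'] ['D','D'] 'h' (by decide)]
        rw [pvSkip1 'd' ['d'] ['D','D'] 'h' (by decide)]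
        rw [pvSkip1 'H' ['H'] ['H','H','2','4'] 'h' (by decide)]
        rw [pvSkip1 'H' ['H'] ['H','H','2','4'] 'h' (by decide)]
        rw [pvPos2 'h' 'h' ['H','H','1','2']]
        simp only [List.cons_append, List.nil_append]
        rw [pvSkip1 'm' ['m'] ['M','I'] 'H' (by decide)]
        rw [pvSkip1 'm' ['m'] ['M','I'] 'H' (by decide)]
        rw [pvSkip1 'm' ['m'] ['M','I'] '1' (by decide)]
        rw [pvSkip1 'm' ['m'] ['M','I'] '2' (by decide)]
        rw [pvSkip1 's' ['s'] ['S','S'] 'H' (by decide)]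
        rw [pvSkip1 's' ['s'] ['S','S'] 'H' (by decide)]
        rw [pvSkip1 's' ['s'] ['S','S'] '1' (by decide)]
        rw [pvSkip1 's' ['s'] ['S','S'] '2' (by decide)]
        rw [pvSkip1 'f' ['f','f'] ['M','S'] 'H' (by decide)]
        rw [pvSkip1 'f' ['f','f'] ['M','S'] 'H' (by decide)]
        rw [pvSkip1 'f' ['f','f'] ['M','S'] '1' (by decide)]
        rw [pvSkip1 'f' ['f','f'] ['M','S'] '2' (by decide)]
        rw [pvSkip1 't' ['t'] ['A','M'] 'H' (by decide)]
        rw [pvSkip1 't' ['t'] ['A','M'] 'H' (by decide)]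
        rw [pvSkip1 't' ['t'] ['A','M'] '1' (by decide)]
        rw [pvSkip1 't' ['t'] ['A','M'] '2' (by decide)]
        rw [hrest]
        simp [pvAltGo, List.isPrefixOf_iff_prefix, List.cons_prefix_cons]
      by_cases h7 : (['m','m'] : List Char) <+: c :: t
      · obtain ⟨rest, hres⟩ := h7
        simp only [List.cons_append, List.nil_append] at hres
        obtain ⟨rfl, rfl⟩ := List.cons.injEq .. |>.mp hres
        have hb : rest.length ≤ n := by simp only [List.length_cons] at hlen; omega
        have hrest := ih rest hb
        simp only [pvChain] at hrest
        simp only [pvChain]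
        rw [pvSkip1 'y' ['y','y','y'] ['Y','Y','Y','Y'] 'm' (by decide)]
        rw [pvSkip1 'y' ['y','y','y'] ['Y','Y','Y','Y'] 'm' (by decide)]
        rw [pvSkip1 'y' ['y'] ['Y','Y'] 'm' (by decide)]
        rw [pvSkip1 'y' ['y'] ['Y','Y'] 'm' (by decide)]
        rw [pvSkip1 'M' ['M'] ['M','M'] 'm' (by decide)]
        rw [pvSkip1 'M' ['M'] ['M','M'] 'm' (by decide)]
        rw [pvSkip1 'd' ['d'] ['D','D'] 'm' (by decide)]
        rw [pvSkip1 'd' ['d'] ['D','D'] 'm' (by decide)]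
        rw [pvSkip1 'H' ['H'] ['H','H','2','4'] 'm' (by decide)]
        rw [pvSkip1 'H' ['H'] ['H','H','2','4'] 'm' (by decide)]
        rw [pvSkip1 'h' ['h'] ['H','H','1','2'] 'm' (by decide)]
        rw [pvSkip1 'h' ['h'] ['H','H','1','2'] 'm' (by decide)]
        rw [pvPos2 'm' 'm' ['M','I']]
        simp only [List.cons_append, List.nil_append]
        rw [pvSkip1 's' ['s'] ['S','S'] 'M' (by decide)]
        rw [pvSkip1 's' ['s'] ['S','S'] 'I' (by decide)]
        rw [pvSkip1 'f' ['f','f'] ['M','S'] 'M' (by decide)]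
        rw [pvSkip1 'f' ['f','f'] ['M','S'] 'I' (by decide)]
        rw [pvSkip1 't' ['t'] ['A','M'] 'M' (by decide)]
        rw [pvSkip1 't' ['t'] ['A','M'] 'I' (by decide)]
        rw [hrest]
        simp [pvAltGo, List.isPrefixOf_iff_prefix, List.cons_prefix_cons]
      by_cases h8 : (['s','s'] : List Char) <+: c :: t
      · obtain ⟨rest, hres⟩ := h8
        simp only [List.cons_append, List.nil_append] at hres
        obtain ⟨rfl, rfl⟩ := List.cons.injEq .. |>.mp hres
        have hb : rest.length ≤ n := by simp only [List.length_cons] at hlen; omega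
        have hrest := ih rest hb
        simp only [pvChain] at hrest
        simp only [pvChain]
        rw [pvSkip1 'y' ['y','y','y'] ['Y','Y','Y','Y'] 's' (by decide)]
        rw [pvSkip1 'y' ['y','y','y'] ['Y','Y','Y','Y'] 's' (by decide)]
        rw [pvSkip1 'y' ['y'] ['Y','Y'] 's' (by decide)]
        rw [pvSkip1 'y' ['y'] ['Y','Y'] 's' (by decide)]
        rw [pvSkip1 'M' ['M'] ['M','M'] 's' (by decide)]
        rw [pvSkip1 'M' ['M'] ['M','M'] 's' (by decide)]
        rw [pvSkip1 'd' ['d'] ['D','D'] 's' (by decide)]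
        rw [pvSkip1 'd' ['d'] ['D','D'] 's' (by decide)]
        rw [pvSkip1 'H' ['H'] ['H','H','2','4'] 's' (by decide)]
        rw [pvSkip1 'H' ['H'] ['H','H','2','4'] 's' (by decide)]
        rw [pvSkip1 'h' ['h'] ['H','H','1','2'] 's' (by decide)]
        rw [pvSkip1 'h' ['h'] ['H','H','1','2'] 's' (by decide)]
        rw [pvSkip1 'm' ['m'] ['M','I'] 's' (by decide)]
        rw [pvSkip1 'm' ['m'] ['M','I'] 's' (by decide)]
        rw [pvPos2 's' 's' ['S','S']]
        simp only [List.cons_append, List.nil_append]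
        rw [pvSkip1 'f' ['f','f'] ['M','S'] 'S' (by decide)]
        rw [pvSkip1 'f' ['f','f'] ['M','S'] 'S' (by decide)]
        rw [pvSkip1 't' ['t'] ['A','M'] 'S' (by decide)]
        rw [pvSkip1 't' ['t'] ['A','M'] 'S' (by decide)]
        rw [hrest]
        simp [pvAltGo, List.isPrefixOf_iff_prefix, List.cons_prefix_cons]
      by_cases h9 : (['f','f','f'] : List Char) <+: c :: t
      · obtain ⟨rest, hres⟩ := h9
        simp only [List.cons_append, List.nil_append] at hres
        obtain ⟨rfl, rfl⟩ := List.cons.injEq .. |>.mp hres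
        have hb : rest.length ≤ n := by simp only [List.length_cons] at hlen; omega
        have hrest := ih rest hb
        simp only [pvChain] at hrest
        simp only [pvChain]
        rw [pvSkip1 'y' ['y','y','y'] ['Y','Y','Y','Y'] 'f' (by decide)]
        rw [pvSkip1 'y' ['y','y','y'] ['Y','Y','Y','Y'] 'f' (by decide)]
        rw [pvSkip1 'y' ['y','y','y'] ['Y','Y','Y','Y'] 'f' (by decide)]
        rw [pvSkip1 'y' ['y'] ['Y','Y'] 'f' (by decide)]
        rw [pvSkip1 'y' ['y'] ['Y','Y'] 'f' (by decide)]
        rw [pvSkip1 'y' ['y'] ['Y','Y'] 'f' (by decide)]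
        rw [pvSkip1 'M' ['M'] ['M','M'] 'f' (by decide)]
        rw [pvSkip1 'M' ['M'] ['M','M'] 'f' (by decide)]
        rw [pvSkip1 'M' ['M'] ['M','M'] 'f' (by decide)]
        rw [pvSkip1 'd' ['d'] ['D','D'] 'f' (by decide)]
        rw [pvSkip1 'd' ['d'] ['D','D'] 'f' (by decide)]
        rw [pvSkip1 'd' ['d'] ['D','D'] 'f' (by decide)]
        rw [pvSkip1 'H' ['H'] ['H','H','2','4'] 'f' (by decide)]
        rw [pvSkip1 'H' ['H'] ['H','H','2','4'] 'f' (by decide)]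
        rw [pvSkip1 'H' ['H'] ['H','H','2','4'] 'f' (by decide)]
        rw [pvSkip1 'h' ['h'] ['H','H','1','2'] 'f' (by decide)]
        rw [pvSkip1 'h' ['h'] ['H','H','1','2'] 'f' (by decide)]
        rw [pvSkip1 'h' ['h'] ['H','H','1','2'] 'f' (by decide)]
        rw [pvSkip1 'm' ['m'] ['M','I'] 'f' (by decide)]
        rw [pvSkip1 'm' ['m'] ['M','I'] 'f' (by decide)]
        rw [pvSkip1 'm' ['m'] ['M','I'] 'f' (by decide)]
        rw [pvSkip1 's' ['s'] ['S','S'] 'f' (by decide)]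
        rw [pvSkip1 's' ['s'] ['S','S'] 'f' (by decide)]
        rw [pvSkip1 's' ['s'] ['S','S'] 'f' (by decide)]
        rw [pvPos3 'f' 'f' 'f' ['M','S']]
        simp only [List.cons_append, List.nil_append]
        rw [pvSkip1 't' ['t'] ['A','M'] 'M' (by decide)]
        rw [pvSkip1 't' ['t'] ['A','M'] 'S' (by decide)]
        rw [hrest]
        simp [pvAltGo, List.isPrefixOf_iff_prefix, List.cons_prefix_cons]
      by_cases h10 : (['t','t'] : List Char) <+: c :: t
      · obtain ⟨rest, hres⟩ := h10
        simp only [List.cons_append, List.nil_append] at hres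
        obtain ⟨rfl, rfl⟩ := List.cons.injEq .. |>.mp hres
        have hb : rest.length ≤ n := by simp only [List.length_cons] at hlen; omega
        have hrest := ih rest hb
        simp only [pvChain] at hrest
        simp only [pvChain]
        rw [pvSkip1 'y' ['y','y','y'] ['Y','Y','Y','Y'] 't' (by decide)]
        rw [pvSkip1 'y' ['y','y','y'] ['Y','Y','Y','Y'] 't' (by decide)]
        rw [pvSkip1 'y' ['y'] ['Y','Y'] 't' (by decide)]
        rw [pvSkip1 'y' ['y'] ['Y','Y'] 't' (by decide)]
        rw [pvSkip1 'M' ['M'] ['M','M'] 't' (by decide)]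
        rw [pvSkip1 'M' ['M'] ['M','M'] 't' (by decide)]
        rw [pvSkip1 'd' ['d'] ['D','D'] 't' (by decide)]
        rw [pvSkip1 'd' ['d'] ['D','D'] 't' (by decide)]
        rw [pvSkip1 'H' ['H'] ['H','H','2','4'] 't' (by decide)]
        rw [pvSkip1 'H' ['H'] ['H','H','2','4'] 't' (by decide)]
        rw [pvSkip1 'h' ['h'] ['H','H','1','2'] 't' (by decide)]
        rw [pvSkip1 'h' ['h'] ['H','H','1','2'] 't' (by decide)]
        rw [pvSkip1 'm' ['m'] ['M','I'] 't' (by decide)]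
        rw [pvSkip1 'm' ['m'] ['M','I'] 't' (by decide)]
        rw [pvSkip1 's' ['s'] ['S','S'] 't' (by decide)]
        rw [pvSkip1 's' ['s'] ['S','S'] 't' (by decide)]
        rw [pvSkip1 'f' ['f','f'] ['M','S'] 't' (by decide)]
        rw [pvSkip1 'f' ['f','f'] ['M','S'] 't' (by decide)]
        rw [pvPos2 't' 't' ['A','M']]
        simp only [List.cons_append, List.nil_append]
        rw [hrest]
        simp [pvAltGo, List.isPrefixOf_iff_prefix, List.cons_prefix_cons]
      have hb : t.length ≤ n := by simp only [List.length_cons] at hlen; omega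
      have hrest := ih t hb
      simp only [pvChain] at hrest
      have N1 := h1
      have N2 : ¬ (['y','y'] : List Char) <+: c :: pvRep ['y','y','y','y'] ['Y','Y','Y','Y'] (t) := by
        intro hp
        obtain ⟨rfl, hp'⟩ := List.cons_prefix_cons.mp hp
        exact h2 (List.cons_prefix_cons.mpr ⟨rfl, (pvRep_transfer ['y','y','y','y'] ['Y','Y','Y','Y'] (by decide) (by decide) (by simp) hp')⟩)
      have N3 : ¬ (['M','M'] : List Char) <+: c :: pvRep ['y','y'] ['Y','Y'] (pvRep ['y','y','y','y'] ['Y','Y','Y','Y'] (t)) := by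
        intro hp
        obtain ⟨rfl, hp'⟩ := List.cons_prefix_cons.mp hp
        exact h3 (List.cons_prefix_cons.mpr ⟨rfl, (pvRep_transfer ['y','y','y','y'] ['Y','Y','Y','Y'] (by decide) (by decide) (by simp) (pvRep_transfer ['y','y'] ['Y','Y'] (by decide) (by decide) (by simp) hp'))⟩)
      have N4 : ¬ (['d','d'] : List Char) <+: c :: pvRep ['M','M'] ['M','M'] (pvRep ['y','y'] ['Y','Y'] (pvRep ['y','y','y','y'] ['Y','Y','Y','Y'] (t))) := by
        intro hp
        obtain ⟨rfl, hp'⟩ := List.cons_prefix_cons.mp hp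
        exact h4 (List.cons_prefix_cons.mpr ⟨rfl, (pvRep_transfer ['y','y','y','y'] ['Y','Y','Y','Y'] (by decide) (by decide) (by simp) (pvRep_transfer ['y','y'] ['Y','Y'] (by decide) (by decide) (by simp) (pvRep_transfer ['M','M'] ['M','M'] (by decide) (by decide) (by simp) hp')))⟩)
      have N5 : ¬ (['H','H'] : List Char) <+: c :: pvRep ['d','d'] ['D','D'] (pvRep ['M','M'] ['M','M'] (pvRep ['y','y'] ['Y','Y'] (pvRep ['y','y','y','y'] ['Y','Y','Y','Y'] (t)))) := by
        intro hp
        obtain ⟨rfl, hp'⟩ := List.cons_prefix_cons.mp hp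
        exact h5 (List.cons_prefix_cons.mpr ⟨rfl, (pvRep_transfer ['y','y','y','y'] ['Y','Y','Y','Y'] (by decide) (by decide) (by simp) (pvRep_transfer ['y','y'] ['Y','Y'] (by decide) (by decide) (by simp) (pvRep_transfer ['M','M'] ['M','M'] (by decide) (by decide) (by simp) (pvRep_transfer ['d','d'] ['D','D'] (by decide) (by decide) (by simp) hp'))))⟩)
      have N6 : ¬ (['h','h'] : List Char) <+: c :: pvRep ['H','H'] ['H','H','2','4'] (pvRep ['d','d'] ['D','D'] (pvRep ['M','M'] ['M','M'] (pvRep ['y','y'] ['Y','Y'] (pvRep ['y','y','y','y'] ['Y','Y','Y','Y'] (t))))) := by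
        intro hp
        obtain ⟨rfl, hp'⟩ := List.cons_prefix_cons.mp hp
        exact h6 (List.cons_prefix_cons.mpr ⟨rfl, (pvRep_transfer ['y','y','y','y'] ['Y','Y','Y','Y'] (by decide) (by decide) (by simp) (pvRep_transfer ['y','y'] ['Y','Y'] (by decide) (by decide) (by simp) (pvRep_transfer ['M','M'] ['M','M'] (by decide) (by decide) (by simp) (pvRep_transfer ['d','d'] ['D','D'] (by decide) (by decide) (by simp) (pvRep_transfer ['H','H'] ['H','H','2','4'] (by decide) (by decide) (by simp) hp')))))⟩)
      have N7 : ¬ (['m','m'] : List Char) <+: c :: pvRep ['h','h'] ['H','H','1','2'] (pvRep ['H','H'] ['H','H','2','4'] (pvRep ['d','d'] ['D','D'] (pvRep ['M','M'] ['M','M'] (pvRep ['y','y'] ['Y','Y'] (pvRep ['y','y','y','y'] ['Y','Y','Y','Y'] (t)))))) := by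
        intro hp
        obtain ⟨rfl, hp'⟩ := List.cons_prefix_cons.mp hp
        exact h7 (List.cons_prefix_cons.mpr ⟨rfl, (pvRep_transfer ['y','y','y','y'] ['Y','Y','Y','Y'] (by decide) (by decide) (by simp) (pvRep_transfer ['y','y'] ['Y','Y'] (by decide) (by decide) (by simp) (pvRep_transfer ['M','M'] ['M','M'] (by decide) (by decide) (by simp) (pvRep_transfer ['d','d'] ['D','D'] (by decide) (by decide) (by simp) (pvRep_transfer ['H','H'] ['H','H','2','4'] (by decide) (by decide) (by simp) (pvRep_transfer ['h','h'] ['H','H','1','2'] (by decide) (by decide) (by simp) hp'))))))⟩)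
      have N8 : ¬ (['s','s'] : List Char) <+: c :: pvRep ['m','m'] ['M','I'] (pvRep ['h','h'] ['H','H','1','2'] (pvRep ['H','H'] ['H','H','2','4'] (pvRep ['d','d'] ['D','D'] (pvRep ['M','M'] ['M','M'] (pvRep ['y','y'] ['Y','Y'] (pvRep ['y','y','y','y'] ['Y','Y','Y','Y'] (t))))))) := by
        intro hp
        obtain ⟨rfl, hp'⟩ := List.cons_prefix_cons.mp hp
        exact h8 (List.cons_prefix_cons.mpr ⟨rfl, (pvRep_transfer ['y','y','y','y'] ['Y','Y','Y','Y'] (by decide) (by decide) (by simp) (pvRep_transfer ['y','y'] ['Y','Y'] (by decide) (by decide) (by simp) (pvRep_transfer ['M','M'] ['M','M'] (by decide) (by decide) (by simp) (pvRep_transfer ['d','d'] ['D','D'] (by decide) (by decide) (by simp) (pvRep_transfer ['H','H'] ['H','H','2','4'] (by decide) (by decide) (by simp) (pvRep_transfer ['h','h'] ['H','H','1','2'] (by decide) (by decide) (by simp) (pvRep_transfer ['m','m'] ['M','I'] (by decide) (by decide) (by simp) hp')))))))⟩)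
      have N9 : ¬ (['f','f','f'] : List Char) <+: c :: pvRep ['s','s'] ['S','S'] (pvRep ['m','m'] ['M','I'] (pvRep ['h','h'] ['H','H','1','2'] (pvRep ['H','H'] ['H','H','2','4'] (pvRep ['d','d'] ['D','D'] (pvRep ['M','M'] ['M','M'] (pvRep ['y','y'] ['Y','Y'] (pvRep ['y','y','y','y'] ['Y','Y','Y','Y'] (t)))))))) := by
        intro hp
        obtain ⟨rfl, hp'⟩ := List.cons_prefix_cons.mp hp
        exact h9 (List.cons_prefix_cons.mpr ⟨rfl, (pvRep_transfer ['y','y','y','y'] ['Y','Y','Y','Y'] (by decide) (by decide) (by simp) (pvRep_transfer ['y','y'] ['Y','Y'] (by decide) (by decide) (by simp) (pvRep_transfer ['M','M'] ['M','M'] (by decide) (by decide) (by simp) (pvRep_transfer ['d','d'] ['D','D'] (by decide) (by decide) (by simp) (pvRep_transfer ['H','H'] ['H','H','2','4'] (by decide) (by decide) (by simp) (pvRep_transfer ['h','h'] ['H','H','1','2'] (by decide) (by decide) (by simp) (pvRep_transfer ['m','m'] ['M','I'] (by decide) (by decide) (by simp) (pvRep_transfer ['s','s'] ['S','S'] (by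 decide) (by decide) (by simp) hp'))))))))⟩)
      have N10 : ¬ (['t','t'] : List Char) <+: c :: pvRep ['f','f','f'] ['M','S'] (pvRep ['s','s'] ['S','S'] (pvRep ['m','m'] ['M','I'] (pvRep ['h','h'] ['H','H','1','2'] (pvRep ['H','H'] ['H','H','2','4'] (pvRep ['d','d'] ['D','D'] (pvRep ['M','M'] ['M','M'] (pvRep ['y','y'] ['Y','Y'] (pvRep ['y','y','y','y'] ['Y','Y','Y','Y'] (t))))))))) := by
        intro hp
        obtain ⟨rfl, hp'⟩ := List.cons_prefix_cons.mp hp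
        exact h10 (List.cons_prefix_cons.mpr ⟨rfl, (pvRep_transfer ['y','y','y','y'] ['Y','Y','Y','Y'] (by decide) (by decide) (by simp) (pvRep_transfer ['y','y'] ['Y','Y'] (by decide) (by decide) (by simp) (pvRep_transfer ['M','M'] ['M','M'] (by decide) (by decide) (by simp) (pvRep_transfer ['d','d'] ['D','D'] (by decide) (by decide) (by simp) (pvRep_transfer ['H','H'] ['H','H','2','4'] (by decide) (by decide) (by simp) (pvRep_transfer ['h','h'] ['H','H','1','2'] (by decide) (by decide) (by simp) (pvRep_transfer ['m','m'] ['M','I'] (by decide) (by decide) (by simp) (pvRep_transfer ['s','s'] ['S','S'] (by decide) (by decide) (by simp) (pvRep_transfer ['f','f','f'] ['M','S'] (by decide) (by decide) (by simp) hp')))))))))⟩)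
      simp only [pvChain]
      rw [pvRep_neg _ _ _ _ N1]
      rw [pvRep_neg _ _ _ _ N2]
      rw [pvRep_neg _ _ _ _ N3]
      rw [pvRep_neg _ _ _ _ N4]
      rw [pvRep_neg _ _ _ _ N5]
      rw [pvRep_neg _ _ _ _ N6]
      rw [pvRep_neg _ _ _ _ N7]
      rw [pvRep_neg _ _ _ _ N8]
      rw [pvRep_neg _ _ _ _ N9]
      rw [pvRep_neg _ _ _ _ N10]
      rw [hrest]
      simp [pvAltGo, List.isPrefixOf_iff_prefix, h1, h2, h3, h4, h5, h6, h7, h8, h9, h10]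

-- ===== VERDICT (by name: the statement is the Claim_ definition above) =====
theorem dotnet_to_tochar_py_spec : Claim_equal_dotnet_to_tochar_py := by
  unfold Claim_equal_dotnet_to_tochar_py
  intro pattern _
  unfold Spec_dotnet_to_tochar_py dotnet_to_tochar_py dotnet_to_tochar_py_alt
  simp only [List.foldl_cons, List.foldl_nil]
  simp only [PySem.Str.replace, String.toList_ofList]
  rw [show "AM".toList = (['A','M'] : List Char) from by decide]
  rw [show "DD".toList = (['D','D'] : List Char) from by decide]
  rw [show "HH".toList = (['H','H'] : List Char) from by decide]
  rw [show "HH12".toList = (['H','H','1','2'] : List Char) from by decide]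
  rw [show "HH24".toList = (['H','H','2','4'] : List Char) from by decide]
  rw [show "MI".toList = (['M','I'] : List Char) from by decide]
  rw [show "MM".toList = (['M','M'] : List Char) from by decide]
  rw [show "MS".toList = (['M','S'] : List Char) from by decide]
  rw [show "SS".toList = (['S','S'] : List Char) from by decide]
  rw [show "YY".toList = (['Y','Y'] : List Char) from by decide]
  rw [show "YYYY".toList = (['Y','Y','Y','Y'] : List Char) from by decide]
  rw [show "dd".toList = (['d','d'] : List Char) from by decide]
  rw [show "fff".toList = (['f','f','f'] : List Char) from by decide]
  rw [show "hh".toList = (['h','h'] : List Char) from by decide]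
  rw [show "mm".toList = (['m','m'] : List Char) from by decide]
  rw [show "ss".toList = (['s','s'] : List Char) from by decide]
  rw [show "tt".toList = (['t','t'] : List Char) from by decide]
  rw [show "yy".toList = (['y','y'] : List Char) from by decide]
  rw [show "yyyy".toList = (['y','y','y','y'] : List Char) from by decide]
  rw [pvReplace_eq _ _ _ (by decide), pvReplace_eq _ _ _ (by decide),
    pvReplace_eq _ _ _ (by decide), pvReplace_eq _ _ _ (by decide),
    pvReplace_eq _ _ _ (by decide), pvReplace_eq _ _ _ (by decide),
    pvReplace_eq _ _ _ (by decide), pvReplace_eq _ _ _ (by decide),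
    pvReplace_eq _ _ _ (by decide), pvReplace_eq _ _ _ (by decide)]
  exact congrArg String.ofList (pvMain pattern.toList.length pattern.toList le_rfl)
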